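-- pv_equiv track=rewrite | github.com/sytelus/nanuGPT | scripts/datasets/gsm8k/dag_sampler.py | _rows_to_output
-- ===== SOURCE A (Python) =====
-- from typing import Dict, Iterable, Iterator, List, Tuple
--
-- def _rows_to_output(rows: List[int]) -> List[Tuple[int, List[int]]]:
--     """
--     Convert bitmask rows to the requested output format:
--       A list of (node_id, [sorted successor ids]) in topological order.
--     """
--     N = len(rows)
--     out: List[Tuple[int, List[int]]] = []
--     for i in range(N):
--         succs: List[int] = []
--         x = rows[i]
--         while x:
--             lsb = x & -x
--             j = (lsb.bit_length() - 1)
--             succs.append(j)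
--             x ^= lsb
--         succs.sort()
--         out.append((i, succs))
--     return out
-- ===== SOURCE B (Python) =====
-- from typing import List, Tuple
--
-- def _rows_to_output(rows: List[int]) -> List[Tuple[int, List[int]]]:
--     # Positional bit scan: low-to-high positions come out already sorted.
--     return [(i, [j for j in range(x.bit_length()) if (x >> j) & 1])
--             for i, x in enumerate(rows)]
-- ===== Notes on version B (the rewrite author's own statement) =====
-- stated objective: idiomatic
-- what changed: Replaces the LSB-isolation while-loop (x & -x, bit_length, xor) plus the explicit sort with a single comprehension that scans bit positions 0..bit_length-1 in order, so no sort is needed.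
-- outside the precondition, e.g. on _rows_to_output([-1]): A does not finish within the time limit, B returns [(0, [0])]
import Mathlib
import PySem

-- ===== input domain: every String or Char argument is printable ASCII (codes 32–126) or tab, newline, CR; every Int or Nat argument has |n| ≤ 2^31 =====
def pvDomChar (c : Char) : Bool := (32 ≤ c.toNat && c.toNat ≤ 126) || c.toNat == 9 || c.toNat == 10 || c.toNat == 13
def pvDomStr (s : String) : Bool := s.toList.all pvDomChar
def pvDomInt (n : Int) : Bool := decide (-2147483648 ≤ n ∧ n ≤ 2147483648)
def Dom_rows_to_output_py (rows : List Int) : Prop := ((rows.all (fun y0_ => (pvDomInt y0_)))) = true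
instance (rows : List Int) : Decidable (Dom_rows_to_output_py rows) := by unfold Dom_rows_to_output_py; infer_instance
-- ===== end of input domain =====

-- B replaces A's LSB-isolation loop + sort with a single low-to-high positional bit scan (no sort needed); proved equal on nonnegative rows.


-- ===== PORT A =====
-- the 'while x:' loop; on Nat (exact for x ≥ 0, the only inputs Pre_ admits):
-- 'x & -x' is computed as x ^^^ (x &&& (x-1)) (same value for x > 0), 'x ^= lsb' leaves x &&& (x-1).
def pvWhileBits (x : Nat) (succs : List Int) : List Int :=
  if h : x = 0 then succs
  else
    let rest := x &&& (x - 1)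
    let lsb := x ^^^ rest
    let j : Int := (Nat.size lsb : Int) - 1   -- lsb.bit_length() - 1
    pvWhileBits rest (succs ++ [j])
termination_by x
decreasing_by
  exact Nat.lt_of_le_of_lt Nat.and_le_right (Nat.sub_lt (Nat.pos_of_ne_zero h) Nat.one_pos)

def rows_to_output_py (rows : List Int) : List (Int × List Int) :=
  let N : Int := rows.length
  (PySem.List.pyRange 0 N 1).foldl
    (fun out i =>
      let x := PySem.List.pyGetD rows i 0      -- rows[i]; i is always in range
      let succs := pvWhileBits x.toNat []
      out ++ [(i, PySem.List.sorted succs (fun v => v) false)]) []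

-- ===== PORT B =====
-- [(i, [j for j in range(x.bit_length()) if (x >> j) & 1]) for i, x in enumerate(rows)]
-- bit_length / shift on x.toNat: exact for x ≥ 0, the only inputs Pre_ admits.
def rows_to_output_py_alt (rows : List Int) : List (Int × List Int) :=
  (PySem.List.enumerate rows 0).map
    (fun p =>
      (p.1, (PySem.List.pyRange 0 (Nat.size p.2.toNat : Int) 1).filter
              (fun j => ((p.2.toNat >>> j.toNat) &&& 1) == 1)))

-- ===== PRECONDITION & SPEC =====
-- Pre_ excludes rows containing a negative bitmask: there A's 'while x:' loop never terminates.
def Pre_rows_to_output_py (rows : List Int) : Prop := ∀ x ∈ rows, 0 ≤ x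
instance (rows : List Int) : Decidable (Pre_rows_to_output_py rows) := by
  unfold Pre_rows_to_output_py; infer_instance

def pvWitness_rows_to_output_py : List Int := [0, 5, 6, 11]

def Spec_rows_to_output_py (rows : List Int) (out : List (Int × List Int)) : Prop := out = rows_to_output_py_alt rows
instance (rows : List Int) (out : List (Int × List Int)) : Decidable (Spec_rows_to_output_py rows out) := by unfold Spec_rows_to_output_py; infer_instance

-- ===== CLAIM (what is proved, stated in full; the proofs are below) =====
def Claim_equal_rows_to_output_py : Prop := ∀ (rows : List Int), Dom_rows_to_output_py rows → Pre_rows_to_output_py rows → Spec_rows_to_output_py rows (rows_to_output_py rows)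

-- ===== LEMMAS AND PROOFS =====

-- canonical list of set-bit positions, low to high
def pvBitsRec (x : Nat) : List Nat :=
  if h : x = 0 then []
  else (if x % 2 = 1 then [0] else []) ++ (pvBitsRec (x / 2)).map (· + 1)
termination_by x
decreasing_by exact Nat.div_lt_self (Nat.pos_of_ne_zero h) Nat.one_lt_two

theorem pvBitsRec_two_mul (y : Nat) : pvBitsRec (2 * y) = (pvBitsRec y).map (· + 1) := by
  by_cases hy : y = 0
  · subst hy; simp [pvBitsRec]
  · rw [pvBitsRec]
    simp [Nat.mul_div_cancel_left, Nat.mul_ne_zero, hy, Nat.mul_mod_right]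

-- bitwise identities (all for Nat, proved by testBit extensionality)
theorem pv_and_odd (y : Nat) : (2 * y + 1) &&& (2 * y) = 2 * y := by
  apply Nat.eq_of_testBit_eq; intro i
  rw [Nat.testBit_and]
  cases i with
  | zero =>
    simp only [Nat.testBit_zero]
    have h1 : (2 * y + 1) % 2 = 1 := by omega
    have h2 : (2 * y) % 2 = 0 := by omega
    simp [h1, h2]
  | succ i =>
    simp only [Nat.testBit_succ]
    have h1 : (2 * y + 1) / 2 = y := by omega
    have h2 : (2 * y) / 2 = y := by omega
    rw [h1, h2, Bool.and_self]

theorem pv_xor_odd (y : Nat) : (2 * y + 1) ^^^ (2 * y) = 1 := by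
  apply Nat.eq_of_testBit_eq; intro i
  rw [Nat.testBit_xor]
  cases i with
  | zero =>
    simp only [Nat.testBit_zero]
    have h1 : (2 * y + 1) % 2 = 1 := by omega
    have h2 : (2 * y) % 2 = 0 := by omega
    simp [h1, h2]
  | succ i =>
    simp only [Nat.testBit_succ]
    have h1 : (2 * y + 1) / 2 = y := by omega
    have h2 : (2 * y) / 2 = y := by omega
    have h3 : (1 : Nat) / 2 = 0 := by norm_num
    rw [h1, h2, h3, Bool.xor_self, Nat.zero_testBit]

theorem pv_and_even (y : Nat) (hy : y ≠ 0) :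
    (2 * y) &&& (2 * y - 1) = 2 * (y &&& (y - 1)) := by
  apply Nat.eq_of_testBit_eq; intro i
  rw [Nat.testBit_and]
  cases i with
  | zero =>
    simp only [Nat.testBit_zero]
    have h1 : (2 * y) % 2 = 0 := by omega
    have h2 : (2 * (y &&& (y - 1))) % 2 = 0 := by omega
    simp [h1, h2]
  | succ i =>
    simp only [Nat.testBit_succ]
    have h1 : (2 * y) / 2 = y := by omega
    have h2 : (2 * y - 1) / 2 = y - 1 := by omega
    have h3 : (2 * (y &&& (y - 1))) / 2 = y &&& (y - 1) := by omega
    rw [h1, h2, h3, Nat.testBit_and]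

theorem pv_xor_two_mul (y z : Nat) : (2 * y) ^^^ (2 * z) = 2 * (y ^^^ z) := by
  apply Nat.eq_of_testBit_eq; intro i
  rw [Nat.testBit_xor]
  cases i with
  | zero =>
    simp only [Nat.testBit_zero]
    have h1 : (2 * y) % 2 = 0 := by omega
    have h2 : (2 * z) % 2 = 0 := by omega
    have h3 : (2 * (y ^^^ z)) % 2 = 0 := by omega
    simp [h1, h2, h3]
  | succ i =>
    simp only [Nat.testBit_succ]
    have h1 : (2 * y) / 2 = y := by omega
    have h2 : (2 * z) / 2 = z := by omega
    have h3 : (2 * (y ^^^ z)) / 2 = y ^^^ z := by omega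
    rw [h1, h2, h3, Nat.testBit_xor]

theorem pv_size_two_mul (n : Nat) (hn : n ≠ 0) : Nat.size (2 * n) = Nat.size n + 1 := by
  have h : (2 * n) = Nat.bit false n := by simp [Nat.bit]
  have hb : Nat.bit false n ≠ 0 := by simp [Nat.bit]; omega
  rw [h, Nat.size_bit hb]

-- the key unfolding step of A's loop, in terms of pvBitsRec
theorem pvBitsRec_step (x : Nat) (hx : x ≠ 0) :
    pvBitsRec x = (Nat.size (x ^^^ (x &&& (x - 1))) - 1) :: pvBitsRec (x &&& (x - 1)) := by
  induction x using Nat.strong_induction_on with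
  | _ x ih =>
    rcases Nat.even_or_odd x with ⟨y, hy⟩ | ⟨y, hy⟩
    · -- x = 2 * y, y ≠ 0
      have hy0 : y ≠ 0 := by omega
      have hx2 : x = 2 * y := by omega
      subst hx2
      rw [pv_and_even y hy0, pvBitsRec_two_mul, pvBitsRec_two_mul,
        ih y (by omega) hy0]
      have hxor : (2 * y) ^^^ (2 * (y &&& (y - 1))) = 2 * (y ^^^ (y &&& (y - 1))) :=
        pv_xor_two_mul _ _
      rw [hxor]
      have hlsb : y ^^^ (y &&& (y - 1)) ≠ 0 := by
        intro h
        have := Nat.xor_eq_zero.mp h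
        have hle : y &&& (y - 1) ≤ y - 1 := Nat.and_le_right
        omega
      rw [pv_size_two_mul _ hlsb]
      have hs : 1 ≤ Nat.size (y ^^^ (y &&& (y - 1))) := by
        rcases Nat.eq_zero_or_pos (Nat.size (y ^^^ (y &&& (y - 1)))) with h | h
        · exact absurd (Nat.size_eq_zero.mp h) hlsb
        · exact h
      simp only [List.map_cons]
      congr 1
      omega
    · -- x = 2 * y + 1
      have hx2 : x = 2 * y + 1 := by omega
      subst hx2
      have h1 : 2 * y + 1 - 1 = 2 * y := by omega
      rw [h1, pv_and_odd, pv_xor_odd]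
      have hsz : Nat.size 1 = 1 := by decide
      rw [hsz, pvBitsRec_two_mul]
      have hq : (2 * y + 1) / 2 = y := by omega
      have hm : (2 * y + 1) % 2 = 1 := by omega
      rw [pvBitsRec]
      simp [hq, hm]

-- A's while loop computes pvBitsRec (with accumulator)
theorem pvWhileBits_eq (x : Nat) (acc : List Int) :
    pvWhileBits x acc = acc ++ List.map (fun k : Nat => (k : Int)) (pvBitsRec x) := by
  induction x using Nat.strong_induction_on generalizing acc with
  | _ x ih =>
    by_cases hx : x = 0
    · subst hx; rw [pvWhileBits, pvBitsRec]; simp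
    · rw [pvWhileBits]
      simp only [hx, dite_false]
      rw [ih (x &&& (x - 1))
        (Nat.lt_of_le_of_lt Nat.and_le_right (Nat.sub_lt (Nat.pos_of_ne_zero hx) Nat.one_pos))]
      rw [pvBitsRec_step x hx]
      have hlsb : x ^^^ (x &&& (x - 1)) ≠ 0 := by
        intro h
        have := Nat.xor_eq_zero.mp h
        have hle : x &&& (x - 1) ≤ x - 1 := Nat.and_le_right
        omega
      have hs : 1 ≤ Nat.size (x ^^^ (x &&& (x - 1))) := by
        rcases Nat.eq_zero_or_pos (Nat.size (x ^^^ (x &&& (x - 1)))) with h | h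
        · exact absurd (Nat.size_eq_zero.mp h) hlsb
        · exact h
      simp only [List.map_cons, List.append_assoc, List.singleton_append]
      congr 2
      beta_reduce
      omega

-- pvBitsRec is strictly increasing
theorem pvBitsRec_pairwise (x : Nat) : (pvBitsRec x).Pairwise (· < ·) := by
  induction x using Nat.strong_induction_on with
  | _ x ih =>
    by_cases hx : x = 0
    · subst hx; rw [pvBitsRec]; simp
    · rw [pvBitsRec]
      simp only [hx, dite_false]
      have hmap : ((pvBitsRec (x / 2)).map (· + 1)).Pairwise (· < ·) := by
        refine List.Pairwise.map _ (fun a b h => by omega)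
          (ih (x / 2) (Nat.div_lt_self (Nat.pos_of_ne_zero hx) Nat.one_lt_two))
      by_cases hp : x % 2 = 1
      · simp only [hp, if_true, List.singleton_append, List.pairwise_cons]
        refine ⟨fun b hb => ?_, hmap⟩
        rcases List.mem_map.mp hb with ⟨a, _, rfl⟩
        omega
      · simp [hp, hmap]

-- B's filter over range(bit_length) computes pvBitsRec
theorem pv_filter_range_eq (x : Nat) :
    (List.range (Nat.size x)).filter (fun j => x.testBit j) = pvBitsRec x := by
  induction x using Nat.strong_induction_on with
  | _ x ih =>
    by_cases hx : x = 0
    · subst hx; rw [pvBitsRec]; simp [Nat.size_zero]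
    · have hsize : Nat.size x = Nat.size (x / 2) + 1 := by
        rcases Nat.even_or_odd x with ⟨y, hy⟩ | ⟨y, hy⟩
        · have hx2 : x = 2 * y := by omega
          have hy0 : y ≠ 0 := by omega
          rw [hx2, pv_size_two_mul y hy0, Nat.mul_div_cancel_left _ (by norm_num)]
        · have hx2 : x = 2 * y + 1 := by omega
          have hb : x = Nat.bit true y := by simp [Nat.bit]; omega
          have hbne : Nat.bit true y ≠ 0 := by simp [Nat.bit]
          have hd : x / 2 = y := by omega
          rw [hd, hb, Nat.size_bit hbne]
      rw [pvBitsRec]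
      simp only [hx, dite_false]
      rw [hsize, List.range_succ_eq_map, List.filter_cons]
      rw [List.filter_map]
      have hcomp : ((fun j => x.testBit j) ∘ Nat.succ) = fun j => (x / 2).testBit j := by
        funext j; simp [Nat.testBit_succ]
      rw [hcomp, ih (x / 2) (Nat.div_lt_self (Nat.pos_of_ne_zero hx) Nat.one_lt_two)]
      by_cases hp : x % 2 = 1
      · simp [Nat.testBit_zero, hp, Nat.succ_eq_add_one]
      · simp [Nat.testBit_zero, hp, Nat.succ_eq_add_one]

-- per-row equality: A's sorted LSB loop = B's positional scan, for one nonnegative row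
theorem pv_row_eq (x : Int) :
    PySem.List.sorted (pvWhileBits x.toNat []) (fun v => v) false
      = (PySem.List.pyRange 0 (Nat.size x.toNat : Int) 1).filter
          (fun j => ((x.toNat >>> j.toNat) &&& 1) == 1) := by
  set n := x.toNat with hn
  have hB : (PySem.List.pyRange 0 (Nat.size n : Int) 1).filter
      (fun j => ((n >>> j.toNat) &&& 1) == 1)
      = List.map (fun k : Nat => (k : Int)) ((List.range (Nat.size n)).filter (fun j => n.testBit j)) := by
    rw [PySem.List.pyRange_zero_nat, List.filter_map]
    refine congrArg (List.map _) (List.filter_congr ?_)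
    intro j _
    have hj : (((j : Nat) : Int)).toNat = j := Int.toNat_natCast j
    simp only [Function.comp, hj]
    have ht : n.testBit j = ((n >>> j) &&& 1 == 1) := by
      rw [Nat.testBit, Nat.and_comm]
      cases h : (n >>> j) &&& 1 <;> simp_all [Nat.and_one_is_mod] <;> omega
    rw [ht]
  rw [hB, pv_filter_range_eq, pvWhileBits_eq]
  simp only [List.nil_append]
  apply PySem.List.sorted_eq_self_of_pairwise
  refine List.pairwise_map.mpr ?_
  refine (pvBitsRec_pairwise n).imp ?_
  intro a b h
  exact_mod_cast Nat.le_of_lt h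

-- ===== VERDICT (by name: the statement is the Claim_ definition above) =====
theorem rows_to_output_py_spec : Claim_equal_rows_to_output_py := by
  intro rows _ hpre
  unfold Spec_rows_to_output_py rows_to_output_py rows_to_output_py_alt
  rw [PySem.List.enumerate_eq_map_pyRange rows 0]
  rw [PySem.List.foldl_append_singleton_eq_map]
  simp only [List.nil_append, List.map_map]
  apply List.map_congr_left
  intro j hj
  rcases PySem.List.mem_pyRange_one.mp hj with ⟨hj0, hjN⟩
  have hmem : PySem.List.pyGetD rows j 0 ∈ rows := by
    apply PySem.List.pyGetD_mem
    refine ⟨by omega, ?_⟩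
    simp_all [PySem.List.len]
  have hx : 0 ≤ PySem.List.pyGetD rows j 0 := hpre _ hmem
  simp only [Function.comp]
  exact congrArg (fun l => (j, l)) (pv_row_eq _)
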